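-- pv_equiv track=rewrite | github.com/vjosset/tabletop-print-tools | dungeon-generator/main.py | find_leaf_cells
-- ===== SOURCE A (Python) =====
-- from typing import List, Tuple, Dict, Optional, Set
--
-- def neighbors4(x: int, y: int, W: int, H: int):
--     if x > 0:     yield (x - 1, y)
--     if x < W - 1: yield (x + 1, y)
--     if y > 0:     yield (x, y - 1)
--     if y < H - 1: yield (x, y + 1)
--
-- def find_leaf_cells(floor: List[List[bool]]) -> List[Tuple[int, int]]:
--     """Return all floor cells with exactly one floor neighbour (dead-end corridors)."""
--     H = len(floor)
--     W = len(floor[0]) if H else 0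
--     return [
--         (x, y)
--         for y in range(H) for x in range(W)
--         if floor[y][x]
--         and sum(1 for nx, ny in neighbors4(x, y, W, H) if floor[ny][nx]) == 1
--     ]
-- ===== SOURCE B (Python) =====
-- from typing import List, Tuple
--
-- def find_leaf_cells(floor: List[List[bool]]) -> List[Tuple[int, int]]:
--     """Degree-table version: one pass over right/down adjacent pairs builds a
--     per-cell edge-degree map, then a second pass keeps floor cells of degree 1."""
--     H = len(floor)
--     W = len(floor[0]) if H else 0
--     ends = []
--     for y in range(H):
--         for x in range(W):
--             if floor[y][x]:
--                 if x + 1 < W and floor[y][x + 1]: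
--                     ends.append((x, y))
--                     ends.append((x + 1, y))
--                 if y + 1 < H and floor[y + 1][x]:
--                     ends.append((x, y))
--                     ends.append((x, y + 1))
--     deg = {}
--     for c in ends:
--         deg[c] = deg.get(c, 0) + 1
--     return [(x, y) for y in range(H) for x in range(W)
--             if floor[y][x] and deg.get((x, y), 0) == 1]
-- ===== Notes on version B (the rewrite author's own statement) =====
-- stated objective: alternative
-- what changed: Replaces the per-cell scan of all four neighbours (via the neighbors4 generator) by a single pass over right/down adjacent floor pairs that builds an explicit per-cell edge-degree dictionary, then a second pass keeps floor cells of degree exactly 1.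
import Mathlib
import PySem

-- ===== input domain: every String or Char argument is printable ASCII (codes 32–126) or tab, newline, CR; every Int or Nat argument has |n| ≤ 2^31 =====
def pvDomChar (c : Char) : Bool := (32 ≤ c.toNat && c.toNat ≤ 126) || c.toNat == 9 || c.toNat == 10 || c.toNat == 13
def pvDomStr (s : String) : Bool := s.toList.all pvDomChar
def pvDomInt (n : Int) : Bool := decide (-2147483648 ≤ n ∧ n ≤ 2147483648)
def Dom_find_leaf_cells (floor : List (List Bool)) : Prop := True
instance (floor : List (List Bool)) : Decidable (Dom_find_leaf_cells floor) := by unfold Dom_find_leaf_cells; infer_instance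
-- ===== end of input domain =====

-- B replaces the per-cell scan of all four neighbours by an explicit per-cell edge-degree
-- dictionary built in one pass over right/down adjacent floor pairs (objective: alternative).

-- ===== PORT A =====
-- floor[y][x]; pyGetD is exact here: Pre_ keeps every such access in range
def pvCell (floor : List (List Bool)) (x y : Int) : Bool :=
  PySem.List.pyGetD (PySem.List.pyGetD floor y ([] : List Bool)) x false

def neighbors4 (x y W H : Int) : List (Int × Int) :=
  (if x > 0 then [(x - 1, y)] else []) ++
  (if x < W - 1 then [(x + 1, y)] else []) ++
  (if y > 0 then [(x, y - 1)] else []) ++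
  (if y < H - 1 then [(x, y + 1)] else [])

def find_leaf_cells (floor : List (List Bool)) : List (Int × Int) :=
  let H : Int := floor.length
  let W : Int := if H ≠ 0 then ((PySem.List.pyGetD floor 0 ([] : List Bool)).length : Int) else 0
  (PySem.List.pyRange 0 H 1).flatMap (fun y =>
    (PySem.List.pyRange 0 W 1).flatMap (fun x =>
      if pvCell floor x y &&
         (((neighbors4 x y W H).map (fun p => if pvCell floor p.1 p.2 then (1 : Int) else 0)).sum == 1)
      then [(x, y)] else []))

-- ===== PORT B =====
def find_leaf_cells_alt (floor : List (List Bool)) : List (Int × Int) :=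
  let H : Int := floor.length
  let W : Int := if H ≠ 0 then ((PySem.List.pyGetD floor 0 ([] : List Bool)).length : Int) else 0
  let ends : List (Int × Int) :=
    (PySem.List.pyRange 0 H 1).foldl (fun acc y =>
      (PySem.List.pyRange 0 W 1).foldl (fun acc x =>
        if pvCell floor x y then
          let acc1 := if decide (x + 1 < W) && pvCell floor (x + 1) y
                      then acc ++ [(x, y)] ++ [(x + 1, y)] else acc
          if decide (y + 1 < H) && pvCell floor x (y + 1)
          then acc1 ++ [(x, y)] ++ [(x, y + 1)] else acc1
        else acc) acc) []
  let deg : PySem.Dict (Int × Int) Int :=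
    ends.foldl (fun d c => d.insert c (d.getD c 0 + 1)) PySem.Dict.empty
  (PySem.List.pyRange 0 H 1).flatMap (fun y =>
    (PySem.List.pyRange 0 W 1).flatMap (fun x =>
      if pvCell floor x y && (deg.getD (x, y) 0 == 1) then [(x, y)] else []))

-- ===== PRECONDITION & SPEC =====
-- Pre_ excludes exactly the jagged grids on which Python A raises IndexError
-- (a row shorter than the first row is indexed at an x below W = len(floor[0])).
def Pre_find_leaf_cells (floor : List (List Bool)) : Prop :=
  ∀ row ∈ floor, (floor.headD []).length ≤ row.length
instance (floor : List (List Bool)) : Decidable (Pre_find_leaf_cells floor) := by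
  unfold Pre_find_leaf_cells; infer_instance

def pvWitness_find_leaf_cells : List (List Bool) := [[true, true], [true, false]]

def Spec_find_leaf_cells (floor : List (List Bool)) (out : List (Int × Int)) : Prop :=
  out = find_leaf_cells_alt floor
instance (floor : List (List Bool)) (out : List (Int × Int)) : Decidable (Spec_find_leaf_cells floor out) := by
  unfold Spec_find_leaf_cells; infer_instance

-- ===== CLAIM (what is proved, stated in full; the proofs are below) =====
def Claim_equal_find_leaf_cells : Prop := ∀ (floor : List (List Bool)), Dom_find_leaf_cells floor → Pre_find_leaf_cells floor → Spec_find_leaf_cells floor (find_leaf_cells floor)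

-- ===== LEMMAS AND PROOFS =====

-- the two edge-end pairs emitted by B at cell (x, y), as one list
def pvG (floor : List (List Bool)) (W H y x : Int) : List (Int × Int) :=
  (if pvCell floor x y && (decide (x + 1 < W) && pvCell floor (x + 1) y)
   then [(x, y), (x + 1, y)] else []) ++
  (if pvCell floor x y && (decide (y + 1 < H) && pvCell floor x (y + 1))
   then [(x, y), (x, y + 1)] else [])

-- B's nested append loop builds exactly the flattened per-cell edge-end lists
lemma pv_ends_eq (floor : List (List Bool)) (W H : Int) :
    ((PySem.List.pyRange 0 H 1).foldl (fun acc y =>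
      (PySem.List.pyRange 0 W 1).foldl (fun acc x =>
        if pvCell floor x y then
          let acc1 := if decide (x + 1 < W) && pvCell floor (x + 1) y
                      then acc ++ [(x, y)] ++ [(x + 1, y)] else acc
          if decide (y + 1 < H) && pvCell floor x (y + 1)
          then acc1 ++ [(x, y)] ++ [(x, y + 1)] else acc1
        else acc) acc) []) =
    (PySem.List.pyRange 0 H 1).flatMap (fun y =>
      (PySem.List.pyRange 0 W 1).flatMap (fun x => pvG floor W H y x)) := by
  have inner : ∀ (y : Int) (acc : List (Int × Int)),
      (PySem.List.pyRange 0 W 1).foldl (fun acc x =>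
        if pvCell floor x y then
          let acc1 := if decide (x + 1 < W) && pvCell floor (x + 1) y
                      then acc ++ [(x, y)] ++ [(x + 1, y)] else acc
          if decide (y + 1 < H) && pvCell floor x (y + 1)
          then acc1 ++ [(x, y)] ++ [(x, y + 1)] else acc1
        else acc) acc =
      acc ++ (PySem.List.pyRange 0 W 1).flatMap (fun x => pvG floor W H y x) := by
    intro y acc
    rw [PySem.List.foldl_congr_mem _ _ (fun acc x => acc ++ pvG floor W H y x) acc ?_,
      PySem.List.foldl_append_eq_flatMap]
    intro acc x _
    by_cases h1 : pvCell floor x y <;>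
      by_cases h2 : decide (x + 1 < W) && pvCell floor (x + 1) y <;>
      by_cases h3 : decide (y + 1 < H) && pvCell floor x (y + 1) <;>
      simp [pvG, h1, h2, h3]
  rw [PySem.List.foldl_congr_mem _ _
      (fun acc y => acc ++ (PySem.List.pyRange 0 W 1).flatMap (fun x => pvG floor W H y x)) [] ?_,
    PySem.List.foldl_append_eq_flatMap, List.nil_append]
  intro acc y _
  exact inner y acc

-- a Nat-valued sum over range(a, b) whose support lies in {s, t}
lemma pv_sum_support2 (a b s t : Int) (hst : s ≠ t) (h : Int → Nat)
    (h0 : ∀ u, a ≤ u → u < b → u ≠ s → u ≠ t → h u = 0) :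
    ((PySem.List.pyRange a b 1).map h).sum =
      (if a ≤ s ∧ s < b then h s else 0) + (if a ≤ t ∧ t < b then h t else 0) := by
  have key : ∀ n : Nat, ∀ a' : Int, a ≤ a' → (b - a').toNat = n →
      ((PySem.List.pyRange a' b 1).map h).sum =
      (if a' ≤ s ∧ s < b then h s else 0) + (if a' ≤ t ∧ t < b then h t else 0) := by
    intro n
    induction n with
    | zero =>
      intro a' haa ha
      rw [PySem.List.pyRange_one_eq_nil (by omega)]
      have h1 : ¬ (a' ≤ s ∧ s < b) := by omega
      have h2 : ¬ (a' ≤ t ∧ t < b) := by omega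
      simp [h1, h2]
    | succ n ih =>
      intro a' haa ha
      rw [PySem.List.pyRange_one_cons (by omega), List.map_cons, List.sum_cons,
        ih (a' + 1) (by omega) (by omega)]
      by_cases has : a' = s
      · rw [has]; split_ifs <;> omega
      · by_cases hat : a' = t
        · rw [hat]; split_ifs <;> omega
        · rw [h0 a' (by omega) (by omega) has hat]
          have c2 : (a' ≤ s ∧ s < b) ↔ (a' + 1 ≤ s ∧ s < b) := by omega
          have c3 : (a' ≤ t ∧ t < b) ↔ (a' + 1 ≤ t ∧ t < b) := by omega
          simp only [c2, c3, Nat.zero_add]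
  exact key (b - a).toNat a le_rfl rfl

lemma pv_count_zero_col (floor : List (List Bool)) (W H x y y' x' : Int)
    (h1 : x' ≠ x - 1) (h2 : x' ≠ x) :
    (pvG floor W H y' x').count (x, y) = 0 := by
  apply List.count_eq_zero.2
  intro hmem
  simp [pvG, List.mem_append, Prod.ext_iff] at hmem
  rcases hmem with ⟨-, h | h⟩ | ⟨-, h | h⟩ <;> omega

lemma pv_count_zero_row (floor : List (List Bool)) (W H x y y' x' : Int)
    (h1 : y' ≠ y - 1) (h2 : y' ≠ y) :
    (pvG floor W H y' x').count (x, y) = 0 := by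
  apply List.count_eq_zero.2
  intro hmem
  simp [pvG, List.mem_append, Prod.ext_iff] at hmem
  rcases hmem with ⟨-, h | h⟩ | ⟨-, h | h⟩ <;> omega

lemma pv_count_self (floor : List (List Bool)) (W H x y : Int) :
    (pvG floor W H y x).count (x, y) =
      (if pvCell floor x y && (decide (x + 1 < W) && pvCell floor (x + 1) y) then 1 else 0) +
      (if pvCell floor x y && (decide (y + 1 < H) && pvCell floor x (y + 1)) then 1 else 0) := by
  unfold pvG
  rw [List.count_append]
  congr 1 <;> split_ifs <;> simp [List.count_cons, Prod.ext_iff] <;> omega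

lemma pv_count_left (floor : List (List Bool)) (W H x y : Int) :
    (pvG floor W H y (x - 1)).count (x, y) =
      (if pvCell floor (x - 1) y && (decide (x < W) && pvCell floor x y) then 1 else 0) := by
  have hx : x - 1 + 1 = x := by omega
  unfold pvG
  rw [hx, List.count_append]
  have h2 : (if pvCell floor (x - 1) y && (decide (y + 1 < H) && pvCell floor (x - 1) (y + 1))
      then [((x - 1 : Int), y), (x - 1, y + 1)] else ([] : List (Int × Int))).count (x, y) = 0 := by
    split_ifs <;> simp [List.count_cons, Prod.ext_iff] <;> omega
  rw [h2]
  split_ifs <;> simp [List.count_cons, Prod.ext_iff] <;> omega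

lemma pv_count_up (floor : List (List Bool)) (W H x y : Int) :
    (pvG floor W H (y - 1) x).count (x, y) =
      (if pvCell floor x (y - 1) && (decide (y < H) && pvCell floor x y) then 1 else 0) := by
  have hy : y - 1 + 1 = y := by omega
  unfold pvG
  rw [hy, List.count_append]
  have h1 : (if pvCell floor x (y - 1) && (decide (x + 1 < W) && pvCell floor (x + 1) (y - 1))
      then [((x : Int), y - 1), (x + 1, y - 1)] else ([] : List (Int × Int))).count (x, y) = 0 := by
    split_ifs <;> simp [List.count_cons, Prod.ext_iff] <;> omega
  rw [h1]
  split_ifs <;> simp [List.count_cons, Prod.ext_iff] <;> omega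

lemma pv_count_upleft (floor : List (List Bool)) (W H x y : Int) :
    (pvG floor W H (y - 1) (x - 1)).count (x, y) = 0 := by
  apply List.count_eq_zero.2
  intro hmem
  simp [pvG, List.mem_append, Prod.ext_iff] at hmem
  rcases hmem with ⟨-, h | h⟩ | ⟨-, h | h⟩ <;> omega

-- total degree of a floor cell in B's edge-end list equals A's floor-neighbour count
set_option maxHeartbeats 1000000 in
lemma pv_deg_eq (floor : List (List Bool)) (W H x y : Int)
    (hx0 : 0 ≤ x) (hxW : x < W) (hy0 : 0 ≤ y) (hyH : y < H)
    (hf : pvCell floor x y = true) :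
    (((PySem.List.pyRange 0 H 1).flatMap (fun y' =>
        (PySem.List.pyRange 0 W 1).flatMap (fun x' => pvG floor W H y' x'))).count (x, y) : Int) =
    ((neighbors4 x y W H).map (fun p => if pvCell floor p.1 p.2 then (1 : Int) else 0)).sum := by
  rw [List.count_flatMap]
  simp only [Function.comp_def, List.count_flatMap]
  rw [pv_sum_support2 0 H (y - 1) y (by omega)
      (fun y' => ((PySem.List.pyRange 0 W 1).map (fun x' => (pvG floor W H y' x').count (x, y))).sum)
      (fun u hu1 hu2 hu3 hu4 => List.sum_eq_zero (by
        intro v hv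
        rcases List.mem_map.1 hv with ⟨x', _, rfl⟩
        exact pv_count_zero_row floor W H x y u x' hu3 hu4))]
  rw [pv_sum_support2 0 W (x - 1) x (by omega) _
      (fun u hu1 hu2 hu3 hu4 => pv_count_zero_col floor W H x y (y - 1) u hu3 hu4)]
  rw [pv_sum_support2 0 W (x - 1) x (by omega) _
      (fun u hu1 hu2 hu3 hu4 => pv_count_zero_col floor W H x y y u hu3 hu4)]
  rw [pv_count_self, pv_count_left, pv_count_up, pv_count_upleft]
  unfold neighbors4
  simp only [List.map_append, List.sum_append, hf, Bool.true_and, Bool.and_true,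
    List.map_cons, List.map_nil, List.sum_cons, List.sum_nil, apply_ite (List.map _),
    apply_ite List.sum]
  have e1 : (0 ≤ y - 1 ∧ y - 1 < H) ↔ 0 < y := by omega
  have e2 : (0 ≤ y ∧ y < H) = True := by simp; omega
  have e3 : (0 ≤ x - 1 ∧ x - 1 < W) ↔ 0 < x := by omega
  have e4 : (0 ≤ x ∧ x < W) = True := by simp; omega
  have e5 : decide (x < W) = true := by simp; omega
  have e6 : decide (y < H) = true := by simp; omega
  simp only [e1, e2, e3, e4, e5, e6, if_true, Bool.and_true]
  by_cases b1 : pvCell floor (x - 1) y <;> by_cases b2 : pvCell floor (x + 1) y <;>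
    by_cases b3 : pvCell floor x (y - 1) <;> by_cases b4 : pvCell floor x (y + 1) <;>
    simp only [b1, b2, b3, b4, Bool.true_and, Bool.false_and, Bool.and_true, Bool.and_false,
      if_false, if_true, decide_eq_true_eq] <;> split_ifs <;> push_cast <;> omega

-- ===== VERDICT (by name: the statement is the Claim_ definition above) =====
theorem find_leaf_cells_spec : Claim_equal_find_leaf_cells := by
  intro floor _ _
  unfold Spec_find_leaf_cells
  simp only [find_leaf_cells, find_leaf_cells_alt]
  rw [pv_ends_eq]
  apply List.flatMap_congr
  intro y hy
  apply List.flatMap_congr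
  intro x hx
  rw [PySem.List.mem_pyRange_one] at hy hx
  by_cases hf : pvCell floor x y
  · rw [PySem.Dict.getD_foldl_insert_add_one, PySem.Dict.getD_empty,
      pv_deg_eq floor _ _ x y hx.1 hx.2 hy.1 hy.2 hf]
    simp
  · simp [hf]
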